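-- pv_equiv track=rewrite | github.com/juani-castore/codigoFacultad | introProgramacion/TP_1/templates/cafetero.py | n_esimo_cafetero
-- ===== SOURCE A (Python) =====
-- def filtrar_solo_CAFE(s: str) -> str:
--     '''
--     requiere: nada
--     devuelve: las letras {C,A,F,E} en el mismo orden que aparecen en el argumento
--
--     '''
--     i: int = 0
--     cafe: str = ""
--     #A
--     while(i < len(s)):
--         #B
--         if(s[i] in "CAFE"):
--             cafe = cafe + s[i]
--         i = i + 1
--         #C
--     #D
--     return cafe
--
-- def es_cafetero(n: int) -> bool:
--     """
--     requiere: n > 0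
--     devuelve: un booleano que dice si el numero ingresado es cafetero o no
--     """
--     nroHex: str = hex(n).upper()
--     i: int = 0
--     res: bool = False
--     if("B" in nroHex or "D" in nroHex):
--         res = False
--     elif (filtrar_solo_CAFE(nroHex) == "CAFE"):
--         res = True
--     return res
--
-- def n_esimo_cafetero(n: int) -> int:
--     '''
--     requiere: n > 0
--     devuelve: el n-esimo numero cafetero que existe empezando por 51966 como el 1-esimo
--
--     '''
--     i: int = 0
--     # contador de la cantidad de cafeteros
--     j: int = 51965
--     # numero a analizar para ver si es cafetero o no
--     cafe: int = 0
--     while(i < n):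
--         if(es_cafetero(j)):
--             i = i + 1
--             if(i == n):
--                 cafe = j
--         j = j +1
--     return cafe
-- ===== SOURCE B (Python) =====
-- def n_esimo_cafetero(n: int) -> int:
--     '''
--     n-th cafetero number (51966 = 0xCAFE is the 1st), found with a purely
--     numeric least-significant-hex-digit automaton: no hex strings are built.
--     '''
--     if n <= 0:
--         return 0
--     remaining = n
--     j = 51966
--     while True:
--         if _caf(j):
--             remaining -= 1
--             if remaining == 0:
--                 return j
--         j += 1
--
--
-- def _caf(m: int) -> bool:
--     # consume m's hex digits least significant first: they must read as
--     # decimal digits freely interleaved with exactly E, F, A, C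
--     # (the pattern CAFE reversed); any B, D or misplaced letter rejects.
--     pat = (14, 15, 10, 12)
--     state = 0
--     while m > 0:
--         d = m % 16
--         m //= 16
--         if d < 10:
--             continue
--         if state < 4 and d == pat[state]:
--             state += 1
--         else:
--             return False
--     return state == 4
-- ===== Notes on version B (the rewrite author's own statement) =====
-- stated objective: alternative
-- what changed: B replaces A's per-number hex-string pipeline (hex(), upper(), substring membership, character filtering, string comparison) by a purely numeric automaton that consumes hex digits least-significant-first via % 16 and // 16 and matches the reversed pattern E,F,A,C, and the outer search counts down a 'remaining' counter returning immediately instead of counting up with a carried 'cafe' variable.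
import Mathlib
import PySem

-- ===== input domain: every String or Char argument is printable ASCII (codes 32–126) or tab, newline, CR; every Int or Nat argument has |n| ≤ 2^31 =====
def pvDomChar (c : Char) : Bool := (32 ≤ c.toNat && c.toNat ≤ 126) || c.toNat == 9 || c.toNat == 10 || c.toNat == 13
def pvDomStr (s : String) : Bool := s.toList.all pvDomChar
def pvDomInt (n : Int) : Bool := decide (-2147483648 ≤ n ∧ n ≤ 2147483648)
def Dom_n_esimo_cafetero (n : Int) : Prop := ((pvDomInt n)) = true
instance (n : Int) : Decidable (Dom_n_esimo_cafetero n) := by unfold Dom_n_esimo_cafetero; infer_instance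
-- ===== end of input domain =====

-- B replaces A's hex-string pipeline by a numeric least-significant-digit automaton and a
-- countdown loop; objective: alternative (constant-factor mechanism, no string building).
-- Both loops are unbounded Python whiles; the ports make them total with a fuel parameter,
-- proved sufficient for every n admitted by Dom (|n| ≤ 2^31).

-- ===== PORT A =====

-- hex digits of m, least significant first (helper for the exact port of Python's hex())
def digitsRev (m : Nat) : List Nat :=
  if m = 0 then [] else m % 16 :: digitsRev (m / 16)
decreasing_by exact Nat.div_lt_self (by omega) (by omega)

-- "0123456789ABCDEF"[d] : the uppercase hex digit character
def hexChU (d : Nat) : Char := ("0123456789ABCDEF".toList).getD d '?'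

-- exact port of hex(m).upper() for m ≥ 1 (the only arguments A passes): "0X" + uppercase digits
def pyHexUpper (m : Nat) : List Char := '0' :: 'X' :: ((digitsRev m).reverse.map hexChU)

-- the while-loop of filtrar_solo_CAFE: i-th char appended to cafe when it is in "CAFE"
def filtrarLoop : List Char → List Char → List Char
  | [], cafe => cafe
  | c :: cs, cafe =>
      if ("CAFE".toList).contains c then filtrarLoop cs (cafe ++ [c])
      else filtrarLoop cs cafe

def filtrar_solo_CAFE (s : List Char) : List Char := filtrarLoop s []

def es_cafetero (m : Nat) : Bool :=
  let nroHex := pyHexUpper m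
  if nroHex.contains 'B' || nroHex.contains 'D' then false
  else if filtrar_solo_CAFE nroHex = ['C', 'A', 'F', 'E'] then true
  else false

-- A's while-loop, state (i, j, cafe); fuel only makes the unbounded while total
def loopA : Nat → Int → Int → Nat → Int → Int
  | 0, _, _, _, cafe => cafe
  | fuel + 1, n, i, j, cafe =>
      if i < n then
        if es_cafetero j then
          loopA fuel n (i + 1) (j + 1) (if i + 1 = n then (j : Int) else cafe)
        else loopA fuel n i (j + 1) cafe
      else cafe

def n_esimo_cafetero (n : Int) : Int := loopA (16 ^ 17 + 1) n 0 51965 0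

-- ===== PORT B =====

-- pat = (14, 15, 10, 12): the hex letters E, F, A, C expected from the least significant end
def patB : Nat → Nat
  | 0 => 14
  | 1 => 15
  | 2 => 10
  | _ => 12

-- B's inner while: consume hex digits of m least-significant first
def cafRev (m state : Nat) : Bool :=
  if m = 0 then state == 4
  else
    if m % 16 < 10 then cafRev (m / 16) state
    else if state < 4 && m % 16 == patB state then cafRev (m / 16) (state + 1)
    else false
decreasing_by all_goals exact Nat.div_lt_self (by omega) (by omega)

def caf (m : Nat) : Bool := cafRev m 0

-- B's outer while True, counting 'remaining' down; fuel only makes it total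
def loopB : Nat → Nat → Nat → Int
  | 0, _, _ => 0
  | fuel + 1, remaining, j =>
      if caf j then
        if remaining - 1 = 0 then (j : Int)
        else loopB fuel (remaining - 1) (j + 1)
      else loopB fuel remaining (j + 1)

def n_esimo_cafetero_alt (n : Int) : Int :=
  if n ≤ 0 then 0 else loopB (16 ^ 17) n.toNat 51966

-- ===== PRECONDITION & SPEC =====
def Spec_n_esimo_cafetero (n : Int) (out : Int) : Prop := out = n_esimo_cafetero_alt n
instance (n : Int) (out : Int) : Decidable (Spec_n_esimo_cafetero n out) := by unfold Spec_n_esimo_cafetero; infer_instance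

-- ===== CLAIM (what is proved, stated in full; the proofs are below) =====
def Claim_equal_n_esimo_cafetero : Prop := ∀ (n : Int), Dom_n_esimo_cafetero n → Spec_n_esimo_cafetero n (n_esimo_cafetero n)

-- ===== LEMMAS AND PROOFS =====

-- the CAFE-letter predicate on hex digit values
def pCafe (d : Nat) : Bool := d == 12 || d == 10 || d == 15 || d == 14

theorem digitsRev_lt (m : Nat) : ∀ d ∈ digitsRev m, d < 16 := by
  fun_induction digitsRev m with
  | case1 => simp
  | case2 m hm ih =>
      intro d hd
      rcases List.mem_cons.mp hd with h | h
      · omega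
      · exact ih d h

theorem filtrarLoop_eq (cs acc : List Char) :
    filtrarLoop cs acc = acc ++ cs.filter (fun c => ("CAFE".toList).contains c) := by
  induction cs generalizing acc with
  | nil => simp [filtrarLoop]
  | cons c cs ih =>
      simp only [filtrarLoop, List.filter_cons]
      split_ifs with h <;> simp_all

theorem hexChU_eq_C (d : Nat) (h : d < 16) : hexChU d = 'C' ↔ d = 12 := by
  interval_cases d <;> simp [hexChU]
theorem hexChU_eq_A (d : Nat) (h : d < 16) : hexChU d = 'A' ↔ d = 10 := by
  interval_cases d <;> simp [hexChU]
theorem hexChU_eq_F (d : Nat) (h : d < 16) : hexChU d = 'F' ↔ d = 15 := by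
  interval_cases d <;> simp [hexChU]
theorem hexChU_eq_E (d : Nat) (h : d < 16) : hexChU d = 'E' ↔ d = 14 := by
  interval_cases d <;> simp [hexChU]
theorem hexChU_eq_B (d : Nat) (h : d < 16) : hexChU d = 'B' ↔ d = 11 := by
  interval_cases d <;> simp [hexChU]
theorem hexChU_eq_D (d : Nat) (h : d < 16) : hexChU d = 'D' ↔ d = 13 := by
  interval_cases d <;> simp [hexChU]

theorem mem_map_hexChU_B (ds : List Nat) (h : ∀ d ∈ ds, d < 16) :
    'B' ∈ ds.map hexChU ↔ 11 ∈ ds := by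
  simp only [List.mem_map]
  constructor
  · rintro ⟨d, hd, he⟩; rw [← (hexChU_eq_B d (h d hd)).mp he]; exact hd
  · intro hd; exact ⟨11, hd, by simp [hexChU]⟩

theorem mem_map_hexChU_D (ds : List Nat) (h : ∀ d ∈ ds, d < 16) :
    'D' ∈ ds.map hexChU ↔ 13 ∈ ds := by
  simp only [List.mem_map]
  constructor
  · rintro ⟨d, hd, he⟩; rw [← (hexChU_eq_D d (h d hd)).mp he]; exact hd
  · intro hd; exact ⟨13, hd, by simp [hexChU]⟩

theorem filter_map_hexChU (ds : List Nat) (h : ∀ d ∈ ds, d < 16) :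
    (ds.map hexChU).filter (fun c => ("CAFE".toList).contains c) =
      (ds.filter pCafe).map hexChU := by
  induction ds with
  | nil => rfl
  | cons d ds ih =>
      have hd : d < 16 := h d (by simp)
      have hds : ∀ x ∈ ds, x < 16 := fun x hx => h x (by simp [hx])
      simp only [List.map_cons, List.filter_cons]
      have : (("CAFE".toList).contains (hexChU d)) = pCafe d := by
        interval_cases d <;> simp [hexChU, pCafe]
      rw [this]
      split
      · rw [List.map_cons, ih hds]
      · exact ih hds

theorem map_hexChU_eq_CAFE (ds : List Nat) (h : ∀ d ∈ ds, d < 16) :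
    ds.map hexChU = ['C', 'A', 'F', 'E'] ↔ ds = [12, 10, 15, 14] := by
  constructor
  · intro he
    rcases ds with _ | ⟨a, ds⟩; · simp at he
    rcases ds with _ | ⟨b, ds⟩; · simp at he
    rcases ds with _ | ⟨c, ds⟩; · simp at he
    rcases ds with _ | ⟨d, ds⟩; · simp at he
    rcases ds with _ | ⟨e, ds⟩
    case cons.cons.cons.cons.cons => simp at he
    simp only [List.map_cons, List.map_nil, List.cons.injEq, and_true] at he
    obtain ⟨h1, h2, h3, h4⟩ := he
    have := (hexChU_eq_C a (h a (by simp))).mp h1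
    have := (hexChU_eq_A b (h b (by simp))).mp h2
    have := (hexChU_eq_F c (h c (by simp))).mp h3
    have := (hexChU_eq_E d (h d (by simp))).mp h4
    simp_all
  · rintro rfl; decide

-- characterisation of A's string test over the MSB-first digit list
theorem es_iff (m : Nat) :
    es_cafetero m = true ↔
      (¬ 11 ∈ (digitsRev m).reverse ∧ ¬ 13 ∈ (digitsRev m).reverse ∧
        ((digitsRev m).reverse.filter pCafe = [12, 10, 15, 14])) := by
  have hlt : ∀ d ∈ (digitsRev m).reverse, d < 16 :=
    fun d hd => digitsRev_lt m d (List.mem_reverse.mp hd)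
  rw [es_cafetero]
  set ds := (digitsRev m).reverse with hds
  have hB : (pyHexUpper m).contains 'B' = decide (11 ∈ ds) := by
    simp [pyHexUpper, ← hds, mem_map_hexChU_B ds hlt]
  have hD : (pyHexUpper m).contains 'D' = decide (13 ∈ ds) := by
    simp [pyHexUpper, ← hds, mem_map_hexChU_D ds hlt]
  have hfil : filtrar_solo_CAFE (pyHexUpper m) = (ds.filter pCafe).map hexChU := by
    rw [pyHexUpper, ← hds, filtrar_solo_CAFE]
    rw [show filtrarLoop ('0' :: 'X' :: ds.map hexChU) [] = filtrarLoop (ds.map hexChU) [] by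
      rw [filtrarLoop, if_neg (by decide), filtrarLoop, if_neg (by decide)]]
    rw [filtrarLoop_eq, List.nil_append, filter_map_hexChU ds hlt]
  simp only [hB, hD, hfil]
  have hfd : ∀ x ∈ ds.filter pCafe, x < 16 := fun x hx => hlt x (List.mem_of_mem_filter hx)
  by_cases h11 : 11 ∈ ds
  · simp [h11]
  · by_cases h13 : 13 ∈ ds
    · simp [h11, h13]
    · simp only [h11, h13, decide_false, Bool.or_self, Bool.false_eq_true, if_false,
        not_false_iff, true_and]
      by_cases hf : (ds.filter pCafe).map hexChU = ['C', 'A', 'F', 'E']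
      · have h4 := (map_hexChU_eq_CAFE _ hfd).mp hf
        constructor
        · intro _; exact h4
        · intro _; simp [hf]
      · simp only [hf, if_false]
        constructor
        · intro h; cases h
        · intro h; exact absurd ((map_hexChU_eq_CAFE _ hfd).mpr h) hf

-- list version of B's automaton (LSB-first digits)
def goR : List Nat → Nat → Bool
  | [], s => s == 4
  | d :: ds, s =>
      if d < 10 then goR ds s
      else if s < 4 && d == patB s then goR ds (s + 1)
      else false

theorem cafRev_eq_goR (m : Nat) : ∀ s, cafRev m s = goR (digitsRev m) s := by
  induction m using Nat.strong_induction_on with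
  | _ m ih =>
    intro s
    by_cases hm : m = 0
    · subst hm; rw [cafRev, digitsRev]; simp [goR]
    · rw [cafRev, digitsRev, if_neg hm, if_neg hm]
      have ihm := ih (m / 16) (Nat.div_lt_self (by omega) (by omega))
      simp only [goR]
      split_ifs <;> simp_all

theorem goR_iff (ds : List Nat) : ∀ s : Nat, (∀ d ∈ ds, d < 16) → s ≤ 4 →
    (goR ds s = true ↔
      (¬ 11 ∈ ds ∧ ¬ 13 ∈ ds ∧ ds.filter pCafe = ([14, 15, 10, 12] : List Nat).drop s)) := by
  induction ds with
  | nil =>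
      intro s _ hs
      interval_cases s <;> simp [goR]
  | cons d ds ih =>
      intro s hlt hs
      have hd : d < 16 := hlt d (by simp)
      have hds : ∀ x ∈ ds, x < 16 := fun x hx => hlt x (by simp [hx])
      interval_cases d <;> interval_cases s <;>
        simp [goR, patB, pCafe, ih _ hds (by omega), ih _ hds]

theorem es_eq_caf (m : Nat) : es_cafetero m = caf m := by
  rw [Bool.eq_iff_iff, es_iff, caf, cafRev_eq_goR m 0,
    goR_iff (digitsRev m) 0 (digitsRev_lt m) (by omega)]
  simp only [List.drop_zero]
  rw [List.filter_reverse]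
  constructor
  · rintro ⟨h1, h2, h3⟩
    refine ⟨by simpa using h1, by simpa using h2, ?_⟩
    rw [List.reverse_eq_iff] at h3
    simpa using h3
  · rintro ⟨h1, h2, h3⟩
    refine ⟨by simpa using h1, by simpa using h2, ?_⟩
    rw [List.reverse_eq_iff]
    simpa using h3

-- number of caf-numbers among j, j+1, …, j+f-1
def countCaf : Nat → Nat → Nat
  | _, 0 => 0
  | j, f + 1 => (if caf j then 1 else 0) + countCaf (j + 1) f

theorem loopA_stop (f : Nat) (n i : Int) (j : Nat) (cafe : Int) (h : ¬ i < n) :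
    loopA f n i j cafe = cafe := by
  cases f <;> simp [loopA, h]

theorem loopA_succ (f : Nat) (n i : Int) (j : Nat) (cafe : Int) :
    loopA (f + 1) n i j cafe =
      if i < n then
        if es_cafetero j then
          loopA f n (i + 1) (j + 1) (if i + 1 = n then (j : Int) else cafe)
        else loopA f n i (j + 1) cafe
      else cafe := rfl

-- the two loops agree whenever the fuel window contains enough cafeteros
theorem loop_eq (f : Nat) : ∀ (n i : Int) (j : Nat) (cafe : Int), i < n →
    (n - i).toNat ≤ countCaf j f → loopA f n i j cafe = loopB f (n - i).toNat j := by
  induction f with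
  | zero =>
      intro n i j cafe hin hcnt
      simp only [countCaf] at hcnt
      omega
  | succ f ih =>
      intro n i j cafe hin hcnt
      simp only [countCaf] at hcnt
      rw [loopA_succ, if_pos hin, es_eq_caf]
      show _ = (if caf j then
          if (n - i).toNat - 1 = 0 then ((j : Nat) : Int)
          else loopB f ((n - i).toNat - 1) (j + 1)
        else loopB f (n - i).toNat (j + 1))
      by_cases hc : caf j
      · rw [if_pos hc, if_pos hc]
        by_cases hend : i + 1 = n
        · rw [if_pos hend, loopA_stop _ _ _ _ _ (by omega), if_pos (by omega)]
        · rw [if_neg hend, if_neg (by omega)]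
          have h2 : (n - (i + 1)).toNat ≤ countCaf (j + 1) f := by
            rw [if_pos hc] at hcnt
            omega
          rw [ih n (i + 1) (j + 1) cafe (by omega) h2]
          congr 1
          omega
      · rw [if_neg hc, if_neg hc]
        rw [if_neg hc] at hcnt
        exact ih n i (j + 1) cafe hin (by omega)

-- injective monotone families of caf-numbers bound countCaf from below
theorem inj_le_count (f : Nat) : ∀ (j k : Nat) (g : Nat → Nat),
    (∀ a b, a < b → b < k → g a < g b) →
    (∀ a, a < k → caf (g a) = true) →
    (∀ a, a < k → j ≤ g a ∧ g a < j + f) →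
    k ≤ countCaf j f := by
  induction f with
  | zero =>
      intro j k g hmono hcaf hbnd
      rcases Nat.eq_zero_or_pos k with hk | hk
      · omega
      · have := hbnd 0 hk
        omega
  | succ f ih =>
      intro j k g hmono hcaf hbnd
      rcases k with _ | k
      · omega
      · have h0 := hbnd 0 (Nat.succ_pos k)
        have hmin : ∀ a, 0 < a → a < k + 1 → j < g a := by
          intro a ha hak
          have := hmono 0 a ha hak
          omega
        by_cases hg0 : g 0 = j
        · have hcj : caf j = true := hg0 ▸ hcaf 0 (Nat.succ_pos k)
          have hk' : k ≤ countCaf (j + 1) f := by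
            apply ih (j + 1) k (fun a => g (a + 1))
            · intro a b hab hbk
              exact hmono (a + 1) (b + 1) (by omega) (by omega)
            · intro a hak
              exact hcaf (a + 1) (by omega)
            · intro a hak
              have h1 := hmin (a + 1) (by omega) (by omega)
              have h2 := hbnd (a + 1) (by omega)
              omega
          simp only [countCaf, hcj, if_pos]
          omega
        · have hk' : k + 1 ≤ countCaf (j + 1) f := by
            apply ih (j + 1) (k + 1) g hmono hcaf
            intro a hak
            have h2 := hbnd a hak
            rcases Nat.eq_zero_or_pos a with ha | ha
            · subst ha; omega
            · have := hmin a ha hak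
              omega
          simp only [countCaf]
          split <;> omega

-- m's decimal digits reinterpreted as hex digits
def ihex (m : Nat) : Nat :=
  if m = 0 then 0 else m % 10 + 16 * ihex (m / 10)
decreasing_by exact Nat.div_lt_self (by omega) (by omega)

theorem ihex_mono : ∀ b a : Nat, a < b → ihex a < ihex b := by
  intro b
  induction b using Nat.strong_induction_on with
  | _ b ih =>
    intro a hab
    have hb : b ≠ 0 := by omega
    rw [show ihex b = b % 10 + 16 * ihex (b / 10) from by rw [ihex, if_neg hb]]
    by_cases ha : a = 0
    · subst ha
      rw [show ihex 0 = 0 from by rw [ihex]; simp]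
      by_cases hq : b / 10 = 0
      · omega
      · have := ih (b / 10) (Nat.div_lt_self (by omega) (by omega)) 0 (by omega)
        rw [show ihex 0 = 0 from by rw [ihex]; simp] at this
        omega
    · rw [show ihex a = a % 10 + 16 * ihex (a / 10) from by rw [ihex, if_neg ha]]
      by_cases hq : a / 10 = b / 10
      · rw [hq]
        have h1 := Nat.div_add_mod a 10
        have h2 := Nat.div_add_mod b 10
        have : a % 10 < b % 10 := by omega
        omega
      · have hlt : a / 10 < b / 10 := by
          have := Nat.div_le_div_right (c := 10) (Nat.le_of_lt hab)
          omega
        have := ih (b / 10) (Nat.div_lt_self (by omega) (by omega)) (a / 10) hlt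
        have hm : a % 10 < 10 := Nat.mod_lt _ (by omega)
        omega

theorem ihex_mod16 (m : Nat) : ihex m % 16 = m % 10 := by
  by_cases h : m = 0
  · simp [ihex, h]
  · rw [ihex, if_neg h]
    omega

theorem ihex_div16 (m : Nat) : ihex m / 16 = ihex (m / 10) := by
  by_cases h : m = 0
  · simp [ihex, h]
  · rw [ihex, if_neg h]
    omega

theorem ihex_lt_pow : ∀ (L : Nat) (m : Nat), m < 10 ^ L → ihex m < 16 ^ L := by
  intro L
  induction L with
  | zero =>
      intro m hm
      have : m = 0 := by simpa using hm
      simp [this, ihex]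
  | succ L ih =>
      intro m hm
      by_cases h : m = 0
      · have : 0 < 16 ^ (L + 1) := by positivity
        simp [h, ihex]
      · rw [ihex, if_neg h]
        have h10 : m < 10 ^ L * 10 := by rw [← pow_succ]; exact hm
        have hdiv : m / 10 < 10 ^ L := by omega
        have := ih (m / 10) hdiv
        have h16 : (16 : Nat) ^ (L + 1) = 16 ^ L * 16 := pow_succ 16 L
        omega

-- 0xCAFE followed by L decimal hex digits is cafetero
theorem cafPrefix : ∀ (L m : Nat), m < 10 ^ L → cafRev (51966 * 16 ^ L + ihex m) 0 = true := by
  intro L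
  induction L with
  | zero =>
      intro m hm
      have hm0 : m = 0 := by simpa using hm
      subst hm0
      rw [show 51966 * 16 ^ 0 + ihex 0 = 51966 from by rw [ihex]; simp]
      rw [cafRev]; norm_num [patB]
      rw [cafRev]; norm_num [patB]
      rw [cafRev]; norm_num [patB]
      rw [cafRev]; norm_num [patB]
      rw [cafRev]; norm_num
  | succ L ih =>
      intro m hm
      set v := 51966 * 16 ^ (L + 1) + ihex m with hv
      have hp : (0 : Nat) < 16 ^ L := by positivity
      have h16 : 51966 * 16 ^ (L + 1) = 16 * (51966 * 16 ^ L) := by ring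
      have hmod : v % 16 = m % 10 := by
        have := ihex_mod16 m
        omega
      have hdivv : v / 16 = 51966 * 16 ^ L + ihex (m / 10) := by
        have := ihex_div16 m
        omega
      have hv0 : v ≠ 0 := by omega
      have hd10 : v % 16 < 10 := by omega
      rw [cafRev, if_neg hv0, if_pos hd10, hdivv]
      apply ih
      have h10 : m < 10 ^ L * 10 := by rw [← pow_succ]; exact hm
      omega

theorem countCaf_ge : (10 : Nat) ^ 12 ≤ countCaf 51966 (16 ^ 17) := by
  apply inj_le_count (16 ^ 17) 51966 (10 ^ 12) (fun m => 51966 * 16 ^ 12 + ihex m)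
  · intro a b hab _
    have := ihex_mono b a hab
    omega
  · intro a ha
    exact cafPrefix 12 a ha
  · intro a ha
    have h1 := ihex_lt_pow 12 a ha
    have h2 : (1 : Nat) ≤ 16 ^ 12 := Nat.one_le_pow _ _ (by omega)
    have h3 : 51966 * 16 ^ 12 + 16 ^ 12 ≤ 16 ^ 17 := by norm_num
    omega

-- ===== VERDICT (by name: the statement is the Claim_ definition above) =====
theorem caf_51965 : caf 51965 = false := by
  rw [caf, cafRev]
  norm_num [patB]

theorem n_esimo_cafetero_spec : Claim_equal_n_esimo_cafetero := by
  intro n hdom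
  unfold Spec_n_esimo_cafetero n_esimo_cafetero n_esimo_cafetero_alt
  by_cases hn : n ≤ 0
  · rw [if_pos hn, loopA_stop _ _ _ _ _ (by omega)]
  · rw [if_neg hn]
    have hdom' : n ≤ 2147483648 := by
      simp only [Dom_n_esimo_cafetero, pvDomInt, decide_eq_true_eq] at hdom
      omega
    have h1 : loopA (16 ^ 17 + 1) n 0 51965 0 = loopA (16 ^ 17) n 0 51966 0 := by
      rw [loopA_succ, if_pos (by omega : (0 : Int) < n), es_eq_caf, caf_51965]
      norm_num
    have h12 : (10 : Nat) ^ 12 = 1000000000000 := by norm_num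
    have hcount : (n - 0).toNat ≤ countCaf 51966 (16 ^ 17) := by
      have hc := countCaf_ge
      rw [h12] at hc
      omega
    have h2 := loop_eq (16 ^ 17) n 0 51966 0 (by omega) hcount
    rw [sub_zero] at h2
    rw [h1, h2]
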